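-- pv_equiv track=rewrite | github.com/TheMorpheus407/Neural-Evaluator | RestplusAPI/NeuralEvaluator/util.py | payloaddict_to_string
-- ===== SOURCE A (Python) =====
-- def payloaddict_to_string(payload_dict, payload):
--     to_inject = {}
--     counter = 0
--     for j in payload_dict:
--         if "ZAP" in payload_dict[j] and counter < len(payload):
--             s = payload_dict[j].replace("ZAP", payload[counter], 1)
--             counter = counter + 1
--             to_inject.update({j: s})
--         else:
--             to_inject.update({j: payload_dict[j]})
--     return to_inject
-- ===== SOURCE B (Python) =====
-- def payloaddict_to_string(payload_dict, payload):
--     zap_items = [(k, v) for k, v in payload_dict.items() if "ZAP" in v]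
--     repl = {k: v.replace("ZAP", p, 1) for (k, v), p in zip(zap_items, payload)}
--     return {k: repl.get(k, v) for k, v in payload_dict.items()}
-- ===== Notes on version B (the rewrite author's own statement) =====
-- stated objective: simpler
-- what changed: B replaces A's single loop threading a manual counter and a growing dict by three independent comprehensions: collect the ZAP-bearing items, zip them with the payload to build a replacement mapping, then rebuild the dict in one pass looking each key up in that mapping.
import Mathlib
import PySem

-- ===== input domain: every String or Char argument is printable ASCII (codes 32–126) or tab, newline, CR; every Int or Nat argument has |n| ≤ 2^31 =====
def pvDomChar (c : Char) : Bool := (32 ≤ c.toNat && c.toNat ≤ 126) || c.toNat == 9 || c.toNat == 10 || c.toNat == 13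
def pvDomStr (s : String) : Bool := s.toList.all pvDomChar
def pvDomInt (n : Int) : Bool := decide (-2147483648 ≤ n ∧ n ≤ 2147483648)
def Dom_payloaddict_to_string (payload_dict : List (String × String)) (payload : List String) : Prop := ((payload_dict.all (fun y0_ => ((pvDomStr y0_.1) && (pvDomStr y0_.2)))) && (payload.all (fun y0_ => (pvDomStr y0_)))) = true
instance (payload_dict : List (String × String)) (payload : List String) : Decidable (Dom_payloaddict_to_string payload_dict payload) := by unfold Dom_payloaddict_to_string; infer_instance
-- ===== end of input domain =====

-- B replaces A's single loop with a manual counter and a growing dict by three passes: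
-- collect the ZAP-bearing items, zip them with the payload into a replacement map, rebuild the dict.
-- Objective: simpler (same asymptotic cost).

-- shared hand-port of Python's s.replace(old, new, 1) (one replacement); exact for a
-- nonempty `old` (both programs only call it with old = "ZAP")
def pyReplaceOnceChars (s old new : List Char) : List Char :=
  match s with
  | [] => []
  | c :: rest =>
    if old.isPrefixOf (c :: rest) then new ++ (c :: rest).drop old.length
    else c :: pyReplaceOnceChars rest old new

def pyReplaceOnce (s old new : String) : String :=
  String.ofList (pyReplaceOnceChars s.toList old.toList new.toList)

-- ===== PORT A =====
def payloaddict_to_string (payload_dict : List (String × String)) (payload : List String) : List (String × String) :=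
  ((payload_dict.foldl
      (fun (st : PySem.Dict String String × Nat) kv =>
        if PySem.Str.isIn "ZAP" kv.2 && decide (st.2 < payload.length) then
          (st.1.insert kv.1 (pyReplaceOnce kv.2 "ZAP" (payload.getD st.2 "")), st.2 + 1)
        else
          (st.1.insert kv.1 kv.2, st.2))
      (PySem.Dict.empty, 0)).1).items

-- ===== PORT B =====
def payloaddict_to_string_alt (payload_dict : List (String × String)) (payload : List String) : List (String × String) :=
  let zapItems := payload_dict.filter (fun kv => PySem.Str.isIn "ZAP" kv.2)
  let repl : PySem.Dict String String :=
    (zapItems.zip payload).foldl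
      (fun d x => d.insert x.1.1 (pyReplaceOnce x.1.2 "ZAP" x.2)) PySem.Dict.empty
  payload_dict.map (fun kv => (kv.1, repl.getD kv.1 kv.2))

-- ===== PRECONDITION & SPEC =====
-- Pre_ excludes payload_dict lists with duplicate keys: such a list does not represent any
-- Python dict (dict construction collapses duplicates before A runs), so the assoc-list
-- ports' behaviour there is a representation artefact.
def Pre_payloaddict_to_string (payload_dict : List (String × String)) (payload : List String) : Prop :=
  (payload_dict.map Prod.fst).Nodup
instance (payload_dict : List (String × String)) (payload : List String) : Decidable (Pre_payloaddict_to_string payload_dict payload) := by unfold Pre_payloaddict_to_string; infer_instance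

def pvWitness_payloaddict_to_string : (List (String × String)) × List String :=
  ([("a", "x=ZAP"), ("b", "plain"), ("c", "ZAP!")], ["1", "2"])

def Spec_payloaddict_to_string (payload_dict : List (String × String)) (payload : List String) (out : List (String × String)) : Prop := out = payloaddict_to_string_alt payload_dict payload
instance (payload_dict : List (String × String)) (payload : List String) (out : List (String × String)) : Decidable (Spec_payloaddict_to_string payload_dict payload out) := by unfold Spec_payloaddict_to_string; infer_instance

-- ===== CLAIM (what is proved, stated in full; the proofs are below) =====
def Claim_equal_payloaddict_to_string : Prop := ∀ (payload_dict : List (String × String)) (payload : List String), Dom_payloaddict_to_string payload_dict payload → Pre_payloaddict_to_string payload_dict payload → Spec_payloaddict_to_string payload_dict payload (payloaddict_to_string payload_dict payload)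

-- ===== LEMMAS AND PROOFS =====

-- common reference shape: the result as a structural recursion consuming the payload
def goSpec : List (String × String) → List String → List (String × String)
  | [], _ => []
  | kv :: rest, ps =>
    if PySem.Str.isIn "ZAP" kv.2 then
      match ps with
      | p :: ps' => (kv.1, pyReplaceOnce kv.2 "ZAP" p) :: goSpec rest ps'
      | [] => kv :: goSpec rest []
    else kv :: goSpec rest ps

-- A's fold with accumulator and counter, unrolled
theorem foldA_eq (payload : List String) :
    ∀ (pd : List (String × String)) (d : PySem.Dict String String) (c : Nat),
      (pd.map Prod.fst).Nodup →
      (∀ kv ∈ pd, d.contains kv.1 = false) →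
      ((pd.foldl
          (fun (st : PySem.Dict String String × Nat) kv =>
            if PySem.Str.isIn "ZAP" kv.2 && decide (st.2 < payload.length) then
              (st.1.insert kv.1 (pyReplaceOnce kv.2 "ZAP" (payload.getD st.2 "")), st.2 + 1)
            else
              (st.1.insert kv.1 kv.2, st.2))
          (d, c)).1).items = d.items ++ goSpec pd (payload.drop c) := by
  intro pd
  induction pd with
  | nil => intro d c _ _; simp [goSpec]
  | cons kv rest ih =>
    intro d c hnd hfresh
    have hnd0 : (kv.1 :: rest.map Prod.fst).Nodup := by simpa using hnd
    have hkey : kv.1 ∉ rest.map Prod.fst := (List.nodup_cons.mp hnd0).1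
    have hnd' : (rest.map Prod.fst).Nodup := (List.nodup_cons.mp hnd0).2
    have hne : ∀ kv' ∈ rest, kv'.1 ≠ kv.1 := by
      intro kv' hm h; exact hkey (h ▸ List.mem_map_of_mem hm)
    have hfresh' : ∀ v, ∀ kv' ∈ rest, (d.insert kv.1 v).contains kv'.1 = false := by
      intro v kv' hm
      rw [PySem.Dict.contains_insert]
      simp [hne kv' hm, hfresh kv' (List.mem_cons_of_mem _ hm)]
    by_cases hz : PySem.Str.isIn "ZAP" kv.2 = true
    · have hzC : PySem.Chars.isIn ['Z','A','P'] kv.2.toList = true := by simpa using hz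
      by_cases hc : c < payload.length
      · have hdrop : payload.drop c = payload[c] :: payload.drop (c + 1) :=
          List.drop_eq_getElem_cons hc
        have hget : payload.getD c "" = payload[c] := by
          simp [List.getD_eq_getElem?_getD, List.getElem?_eq_getElem hc]
        simp only [List.foldl_cons]
        rw [if_pos (by simp [hzC, hc])]
        rw [ih _ (c + 1) hnd' (hfresh' _),
            PySem.Dict.items_insert_of_not_contains _ _ (hfresh kv (List.mem_cons_self))]
        rw [hget, hdrop]
        simp only [goSpec, hz]
        simp
      · have hdrop : payload.drop c = [] := List.drop_eq_nil_of_le (by omega)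
        have hdrop' : payload.drop (c + 1) = [] := List.drop_eq_nil_of_le (by omega)
        simp only [List.foldl_cons]
        rw [if_neg (by simp [hc])]
        rw [ih _ c hnd' (hfresh' _),
            PySem.Dict.items_insert_of_not_contains _ _ (hfresh kv (List.mem_cons_self))]
        rw [hdrop]
        simp only [goSpec, hz]
        simp
    · have hzC : PySem.Chars.isIn ['Z','A','P'] kv.2.toList = false :=
        Bool.eq_false_iff.mpr (by simpa using hz)
      simp only [List.foldl_cons]
      rw [if_neg (by simp [hzC])]
      rw [ih _ c hnd' (hfresh' _),
          PySem.Dict.items_insert_of_not_contains _ _ (hfresh kv (List.mem_cons_self))]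
      simp only [goSpec]
      rw [if_neg hz]
      try simp

theorem A_eq_goSpec (pd : List (String × String)) (payload : List String)
    (h : (pd.map Prod.fst).Nodup) :
    payloaddict_to_string pd payload = goSpec pd payload := by
  unfold payloaddict_to_string
  rw [foldA_eq payload pd PySem.Dict.empty 0 h (by intro kv _; simp)]
  simp [PySem.Dict.empty]

-- the zipped replacement list of B, as a plain association list
def zmap (pd : List (String × String)) (payload : List String) : List (String × String) :=
  ((pd.filter (fun kv => PySem.Str.isIn "ZAP" kv.2)).zip payload).map
    (fun x => (x.1.1, pyReplaceOnce x.1.2 "ZAP" x.2))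

theorem map_fst_zip_sublist {α β : Type} : ∀ (as : List α) (bs : List β),
    ((as.zip bs).map Prod.fst).Sublist as := by
  intro as
  induction as with
  | nil => intro bs; simp
  | cons a as ih =>
    intro bs
    cases bs with
    | nil => simp
    | cons b bs => simpa using (ih bs).cons₂ a

theorem zmap_fst_eq (pd : List (String × String)) (payload : List String) :
    (zmap pd payload).map Prod.fst
      = (((pd.filter (fun kv => PySem.Str.isIn "ZAP" kv.2)).zip payload).map Prod.fst).map Prod.fst := by
  unfold zmap
  simp [List.map_map, Function.comp]

theorem zmap_keys_mem (pd : List (String × String)) (payload : List String) :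
    ∀ x ∈ (zmap pd payload).map Prod.fst, x ∈ pd.map Prod.fst := by
  intro x hx
  rw [zmap_fst_eq] at hx
  exact (List.Sublist.map Prod.fst List.filter_sublist).subset
    ((List.Sublist.map Prod.fst (map_fst_zip_sublist _ _)).subset hx)

theorem zmap_keys_nodup (pd : List (String × String)) (payload : List String)
    (h : (pd.map Prod.fst).Nodup) : ((zmap pd payload).map Prod.fst).Nodup := by
  have h2 : ((pd.filter (fun kv => PySem.Str.isIn "ZAP" kv.2)).map Prod.fst).Nodup :=
    (List.Sublist.map Prod.fst List.filter_sublist).nodup h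
  have h1 : ((((pd.filter (fun kv => PySem.Str.isIn "ZAP" kv.2)).zip payload).map Prod.fst).map Prod.fst).Nodup :=
    (List.Sublist.map Prod.fst (map_fst_zip_sublist _ _)).nodup h2
  rw [zmap_fst_eq]
  exact h1

theorem repl_eq_mk_zmap (pd : List (String × String)) (payload : List String)
    (h : (pd.map Prod.fst).Nodup) :
    (((pd.filter (fun kv => PySem.Str.isIn "ZAP" kv.2)).zip payload).foldl
      (fun d x => d.insert x.1.1 (pyReplaceOnce x.1.2 "ZAP" x.2)) PySem.Dict.empty)
      = PySem.Dict.mk (zmap pd payload) := by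
  have hn : (((pd.filter (fun kv => PySem.Str.isIn "ZAP" kv.2)).zip payload).map
      (fun x => x.1.1)).Nodup := by
    have hnd := zmap_keys_nodup pd payload h
    rw [zmap_fst_eq, List.map_map] at hnd
    simpa [Function.comp] using hnd
  apply PySem.Dict.ext
  have hfold : (((pd.filter (fun kv => PySem.Str.isIn "ZAP" kv.2)).zip payload).foldl
      (fun d x => d.insert x.1.1 (pyReplaceOnce x.1.2 "ZAP" x.2)) PySem.Dict.empty).items
      = PySem.Dict.empty.items
        ++ ((pd.filter (fun kv => PySem.Str.isIn "ZAP" kv.2)).zip payload).map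
            (fun x => (x.1.1, pyReplaceOnce x.1.2 "ZAP" x.2)) :=
    PySem.Dict.items_foldl_insert_fresh _ _ _ _
      (fun a _ => PySem.Dict.contains_empty _) hn
  rw [hfold]
  rfl

theorem mapLookup_eq_goSpec :
    ∀ (pd : List (String × String)) (payload : List String),
      (pd.map Prod.fst).Nodup →
      pd.map (fun kv => (kv.1, (PySem.Dict.mk (zmap pd payload)).getD kv.1 kv.2)) = goSpec pd payload := by
  intro pd
  induction pd with
  | nil => intro payload _; simp [goSpec]
  | cons kv rest ih =>
    intro payload hnd
    have hnd0 : (kv.1 :: rest.map Prod.fst).Nodup := by simpa using hnd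
    have hkey : kv.1 ∉ rest.map Prod.fst := (List.nodup_cons.mp hnd0).1
    have hnd' : (rest.map Prod.fst).Nodup := (List.nodup_cons.mp hnd0).2
    have hne : ∀ kv' ∈ rest, kv'.1 ≠ kv.1 := by
      intro kv' hm h; exact hkey (h ▸ List.mem_map_of_mem hm)
    by_cases hz : PySem.Str.isIn "ZAP" kv.2 = true
    · have hzC : PySem.Chars.isIn ['Z','A','P'] kv.2.toList = true := by simpa using hz
      cases payload with
      | nil =>
        have hz0 : zmap (kv :: rest) [] = [] := by simp [zmap]
        have hz0' : zmap rest [] = [] := by simp [zmap]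
        rw [List.map_cons, hz0]
        have h0 : (PySem.Dict.mk ([] : List (String × String))).get? kv.1 = none := by
          rw [PySem.Dict.get?_eq_none_iff_not_mem_keys]
          simp [PySem.Dict.keys_mk]
        have hhead : (PySem.Dict.mk ([] : List (String × String))).getD kv.1 kv.2 = kv.2 := by
          rw [PySem.Dict.getD_eq_get?_getD, h0]; rfl
        rw [hhead]
        have htail := ih [] hnd'
        rw [hz0'] at htail
        rw [htail]
        simp only [goSpec, hz]
        simp
      | cons p ps =>
        have hzc : zmap (kv :: rest) (p :: ps) = (kv.1, pyReplaceOnce kv.2 "ZAP" p) :: zmap rest ps := by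
          simp [zmap, hzC]
        rw [List.map_cons, hzc]
        have hhead : (PySem.Dict.mk ((kv.1, pyReplaceOnce kv.2 "ZAP" p) :: zmap rest ps)).getD kv.1 kv.2
            = pyReplaceOnce kv.2 "ZAP" p := by
          rw [PySem.Dict.getD_eq_get?_getD, PySem.Dict.get?_mk_cons]
          simp
        rw [hhead]
        have htail : rest.map (fun kv' => (kv'.1,
            (PySem.Dict.mk ((kv.1, pyReplaceOnce kv.2 "ZAP" p) :: zmap rest ps)).getD kv'.1 kv'.2))
            = rest.map (fun kv' => (kv'.1, (PySem.Dict.mk (zmap rest ps)).getD kv'.1 kv'.2)) := by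
          apply List.map_congr_left
          intro kv' hm
          rw [PySem.Dict.getD_eq_get?_getD, PySem.Dict.get?_mk_cons]
          simp [(by simpa using (hne kv' hm).symm : (kv.1 == kv'.1) = false),
            PySem.Dict.getD_eq_get?_getD]
        rw [htail, ih ps hnd']
        simp only [goSpec, hz]
        simp
    · have hzC : PySem.Chars.isIn ['Z','A','P'] kv.2.toList = false :=
        Bool.eq_false_iff.mpr (by simpa using hz)
      have hzc : zmap (kv :: rest) payload = zmap rest payload := by
        simp [zmap, hzC]
      rw [List.map_cons, hzc]
      have hhead : (PySem.Dict.mk (zmap rest payload)).getD kv.1 kv.2 = kv.2 := by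
        rw [PySem.Dict.getD_eq_get?_getD]
        have h0 : (PySem.Dict.mk (zmap rest payload)).get? kv.1 = none := by
          rw [PySem.Dict.get?_eq_none_iff_not_mem_keys, PySem.Dict.keys_mk]
          intro hmem
          exact hkey (zmap_keys_mem rest payload kv.1 (by simpa using hmem))
        rw [h0]; rfl
      rw [hhead]
      have htail := ih payload hnd'
      rw [htail]
      simp only [goSpec]
      rw [if_neg hz]
      try simp

theorem B_eq_goSpec (pd : List (String × String)) (payload : List String)
    (h : (pd.map Prod.fst).Nodup) :
    payloaddict_to_string_alt pd payload = goSpec pd payload := by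
  unfold payloaddict_to_string_alt
  simp only
  rw [repl_eq_mk_zmap pd payload h]
  exact mapLookup_eq_goSpec pd payload h

-- ===== VERDICT (by name: the statement is the Claim_ definition above) =====
theorem payloaddict_to_string_spec : Claim_equal_payloaddict_to_string := by
  intro pd payload _ hpre
  unfold Spec_payloaddict_to_string
  rw [A_eq_goSpec pd payload hpre, B_eq_goSpec pd payload hpre]
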